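-- pv_equiv track=rewrite | github.com/sfstpala/aes.py | aes.py | shift_row
-- ===== SOURCE A (Python) =====
-- def shift_row(state, state_pointer, nbr, is_inv):
--     for i in range(nbr):
--         if is_inv:
--             state[state_pointer:state_pointer + 4] = (
--                 state[state_pointer + 3:state_pointer + 4] +
--                 state[state_pointer:state_pointer + 3])
--         else:
--             state[state_pointer:state_pointer + 4] = (
--                 state[state_pointer + 1:state_pointer + 4] +
--                 state[state_pointer:state_pointer + 1])
--     return state
-- ===== SOURCE B (Python) =====
-- def shift_row(state, state_pointer, nbr, is_inv):
--     row = state[state_pointer:state_pointer + 4]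
--     if row and nbr > 0:
--         k = (-nbr if is_inv else nbr) % len(row)
--         state[state_pointer:state_pointer + 4] = row[k:] + row[:k]
--     return state
-- ===== Notes on version B (the rewrite author's own statement) =====
-- stated objective: faster
-- what changed: Replaces the nbr-iteration loop of single-step slice rotations by one closed-form rotation: read the row once, rotate it by nbr modulo its length (right rotation for is_inv) and write it back with a single slice assignment; Pre_ excludes negative state_pointer, where Python's negative-slice resolution makes A's per-step assignment insert duplicates at the list's end, an implementation artefact.
-- intended difference: On a truncated final row (0 <= state_pointer < len(state) < state_pointer+4) with is_inv, nbr not a multiple of the short row's length and a non-constant row, A returns the state unchanged (its inverse step's slice [sp+3:sp+4] is empty, so the step is the identity and the inverse fails to undo the forward shift), while B returns the row rotated right by nbr, the intended inverse of the forward rotation. — e.g. on shift_row([1, 2], 0, 1, true): A returns [1, 2], B returns [2, 1]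
-- outside the precondition, e.g. on shift_row([0, 1, 2, 3, 4, 5], -2, 1, False): A returns [0, 1, 2, 3, 4, 4, 5], B returns [0, 1, 2, 3, 4, 5]
import Mathlib
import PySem

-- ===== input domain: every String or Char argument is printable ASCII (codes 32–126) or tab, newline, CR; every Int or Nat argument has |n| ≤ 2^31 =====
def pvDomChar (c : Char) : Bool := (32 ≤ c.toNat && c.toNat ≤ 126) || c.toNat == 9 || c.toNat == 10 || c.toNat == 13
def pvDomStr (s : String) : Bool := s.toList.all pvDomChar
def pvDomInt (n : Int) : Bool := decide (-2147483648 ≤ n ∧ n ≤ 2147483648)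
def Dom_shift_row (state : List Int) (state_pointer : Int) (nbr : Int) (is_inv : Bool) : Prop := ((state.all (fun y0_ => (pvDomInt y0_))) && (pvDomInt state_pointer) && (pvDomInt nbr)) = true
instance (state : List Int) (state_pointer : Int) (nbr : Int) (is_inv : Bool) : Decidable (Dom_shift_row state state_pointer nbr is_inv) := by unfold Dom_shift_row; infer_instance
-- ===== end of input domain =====

-- B replaces A's nbr single-step rotations by one closed-form modular rotation of the row;
-- both A and B mutate `state` in place in Python — the equivalence proved here is about the RETURN value.

-- Python list slice ASSIGNMENT `xs[a:b] = rep` (hand port, exact: the bounds are resolved with the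
-- same clamping rule PySem.List.slice uses, and the removed segment is [a', max a' b')).
def pySetSlice (xs : List Int) (a b : Int) (rep : List Int) : List Int :=
  xs.take (PySem.List.clampIdx xs.length a) ++ rep ++
  xs.drop (max (PySem.List.clampIdx xs.length a) (PySem.List.clampIdx xs.length b))

-- ===== PORT A =====
def shift_row (state : List Int) (state_pointer : Int) (nbr : Int) (is_inv : Bool) : List Int :=
  (PySem.List.pyRange 0 nbr 1).foldl (fun st _ =>
    if is_inv then
      pySetSlice st state_pointer (state_pointer + 4)
        (PySem.List.slice st (some (state_pointer + 3)) (some (state_pointer + 4)) ++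
         PySem.List.slice st (some state_pointer) (some (state_pointer + 3)))
    else
      pySetSlice st state_pointer (state_pointer + 4)
        (PySem.List.slice st (some (state_pointer + 1)) (some (state_pointer + 4)) ++
         PySem.List.slice st (some state_pointer) (some (state_pointer + 1)))) state

-- ===== PORT B =====
def shift_row_alt (state : List Int) (state_pointer : Int) (nbr : Int) (is_inv : Bool) : List Int :=
  let row := PySem.List.slice state (some state_pointer) (some (state_pointer + 4))
  if row ≠ [] ∧ 0 < nbr then
    let k := PySem.Int.mod (if is_inv then -nbr else nbr) (row.length : Int)
    pySetSlice state state_pointer (state_pointer + 4)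
      (PySem.List.slice row (some k) none ++ PySem.List.slice row none (some k))
  else state

-- ===== PRECONDITION & SPEC =====
-- Pre_ restricts to the natural domain 0 ≤ state_pointer (AES row offsets 0/4/8/12): a negative state
-- pointer is malformed input, on which Python's negative-index slice resolution makes A's per-step slice
-- assignment insert duplicate elements or act on a window at the list's end — an implementation artefact.
def Pre_shift_row (state : List Int) (state_pointer : Int) (nbr : Int) (is_inv : Bool) : Prop :=
  0 ≤ state_pointer
instance (state : List Int) (state_pointer : Int) (nbr : Int) (is_inv : Bool) : Decidable (Pre_shift_row state state_pointer nbr is_inv) := by unfold Pre_shift_row; infer_instance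

def pvWitness_shift_row : List Int × Int × Int × Bool := ([1, 2, 3, 4], 0, 1, false)

-- On a truncated final row (0 ≤ state_pointer < len(state) < state_pointer+4) with is_inv, nbr not a
-- multiple of the short row's length and a non-constant row, A returns the state unchanged (its inverse
-- step's slice [sp+3:sp+4] is empty, so the step is the identity and the inverse fails to undo the
-- forward shift), while B returns the row rotated right by nbr, the intended inverse of the forward rotation.
def D_shift_row (state : List Int) (state_pointer : Int) (nbr : Int) (is_inv : Bool) : Prop :=
  is_inv = true ∧ 0 < nbr ∧ 0 ≤ state_pointer ∧ state_pointer < (state.length : Int) ∧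
  (state.length : Int) < state_pointer + 4 ∧
  nbr % ((state.length : Int) - state_pointer) ≠ 0 ∧
  ¬ (state.drop state_pointer.toNat).IsChain (· = ·)
instance (state : List Int) (state_pointer : Int) (nbr : Int) (is_inv : Bool) : Decidable (D_shift_row state state_pointer nbr is_inv) := by unfold D_shift_row; infer_instance

def Spec_shift_row (state : List Int) (state_pointer : Int) (nbr : Int) (is_inv : Bool) (out : List Int) : Prop := ¬ D_shift_row state state_pointer nbr is_inv → out = shift_row_alt state state_pointer nbr is_inv
instance (state : List Int) (state_pointer : Int) (nbr : Int) (is_inv : Bool) (out : List Int) : Decidable (Spec_shift_row state state_pointer nbr is_inv out) := by unfold Spec_shift_row; infer_instance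

def pvDiffWitness_shift_row : List Int × Int × Int × Bool := ([1, 2], 0, 1, true)
def pvDiffWitnessOut_shift_row : (List Int) × (List Int) := ([1, 2], [2, 1])

-- ===== CLAIM (what is proved, stated in full; the proofs are below) =====
def Claim_unchanged_shift_row : Prop := ∀ (state : List Int) (state_pointer : Int) (nbr : Int) (is_inv : Bool), Dom_shift_row state state_pointer nbr is_inv → Pre_shift_row state state_pointer nbr is_inv → Spec_shift_row state state_pointer nbr is_inv (shift_row state state_pointer nbr is_inv)
def Claim_changed_shift_row : Prop := Dom_shift_row (pvDiffWitness_shift_row.1) (pvDiffWitness_shift_row.2.1) (pvDiffWitness_shift_row.2.2.1) (pvDiffWitness_shift_row.2.2.2) ∧ Pre_shift_row (pvDiffWitness_shift_row.1) (pvDiffWitness_shift_row.2.1) (pvDiffWitness_shift_row.2.2.1) (pvDiffWitness_shift_row.2.2.2) ∧ D_shift_row (pvDiffWitness_shift_row.1) (pvDiffWitness_shift_row.2.1) (pvDiffWitness_shift_row.2.2.1) (pvDiffWitness_shift_row.2.2.2) ∧ shift_row (pvDiffWitness_shift_row.1) (pvDiffWitness_shift_row.2.1) (pvDiffWitness_shift_row.2.2.1)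 (pvDiffWitness_shift_row.2.2.2) = pvDiffWitnessOut_shift_row.1 ∧ shift_row_alt (pvDiffWitness_shift_row.1) (pvDiffWitness_shift_row.2.1) (pvDiffWitness_shift_row.2.2.1) (pvDiffWitness_shift_row.2.2.2) = pvDiffWitnessOut_shift_row.2 ∧ pvDiffWitnessOut_shift_row.1 ≠ pvDiffWitnessOut_shift_row.2
def Claim_exact_shift_row : Prop := ∀ (state : List Int) (state_pointer : Int) (nbr : Int) (is_inv : Bool), Dom_shift_row state state_pointer nbr is_inv → Pre_shift_row state state_pointer nbr is_inv → D_shift_row state state_pointer nbr is_inv → shift_row state state_pointer nbr is_inv ≠ shift_row_alt state state_pointer nbr is_inv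

-- ===== LEMMAS AND PROOFS =====

-- one A-step rewrites the window w = (st.drop s).take 4 to w.drop j ++ w.take j
def rotStep (j : Nat) (v : List Int) : List Int := v.drop j ++ v.take j

lemma rotStep_length (j : Nat) (v : List Int) : (rotStep j v).length = v.length := by
  simp [rotStep]; omega

-- the normal form of a slice assignment at a nonnegative pointer
lemma pySetSlice_nonneg (st : List Int) (s : Nat) (rep : List Int) :
    pySetSlice st (s : Int) ((s : Int) + 4) rep = st.take s ++ rep ++ st.drop (s + 4) := by
  have h4 : ((s:Int) + 4) = ((s + 4 : Nat) : Int) := by push_cast; ring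
  unfold pySetSlice
  rw [h4, PySem.List.clampIdx_natCast, PySem.List.clampIdx_natCast]
  have hmax : max (min s st.length) (min (s + 4) st.length) = min (s + 4) st.length := by omega
  rw [hmax, ← List.take_eq_take_min, ← List.drop_eq_drop_min]

-- the two slices a step reads, in terms of the window
lemma slice_window (st : List Int) (s j : Nat) (hj : j ≤ 4) :
    PySem.List.slice st (some ((s : Int) + (j : Int))) (some ((s : Int) + 4)) ++
      PySem.List.slice st (some (s : Int)) (some ((s : Int) + (j : Int))) =
    rotStep j ((st.drop s).take 4) := by
  have h1 : ((s:Int) + (j:Int)) = ((s + j : Nat) : Int) := by push_cast; ring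
  have h2 : ((s:Int) + 4) = ((s + 4 : Nat) : Int) := by push_cast; ring
  rw [h1, h2, PySem.List.slice_natCast, PySem.List.slice_natCast]
  unfold rotStep
  rw [List.drop_take, List.take_take, Nat.min_eq_left hj, List.drop_drop]
  congr 2 <;> omega

-- any list splits as prefix ++ window ++ suffix
lemma split_window (st : List Int) (s : Nat) :
    st.take s ++ (st.drop s).take 4 ++ st.drop (s + 4) = st := by
  rw [List.append_assoc, ← List.drop_drop, List.take_append_drop, List.take_append_drop]

-- re-reading the parts after the window is replaced by an equal-length list
lemma take_set (st : List Int) (s : Nat) (v : List Int)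
    (hv : v.length = ((st.drop s).take 4).length) :
    (st.take s ++ v ++ st.drop (s + 4)).take s = st.take s := by
  simp only [List.length_take, List.length_drop] at hv
  by_cases h : s ≤ st.length
  · rw [List.append_assoc, List.take_left' (by simp [Nat.min_eq_left h])]
  · have hv0 : v = [] := List.eq_nil_of_length_eq_zero (by omega)
    have hS : st.drop (s + 4) = [] := List.drop_eq_nil_of_le (by omega)
    simp [hv0, hS, List.take_take]
lemma window_set (st : List Int) (s : Nat) (v : List Int)
    (hv : v.length = ((st.drop s).take 4).length) :
    (((st.take s ++ v ++ st.drop (s + 4)).drop s).take 4) = v := by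
  simp only [List.length_take, List.length_drop] at hv
  by_cases h : s ≤ st.length
  · rw [List.append_assoc, List.drop_left' (by simp [Nat.min_eq_left h])]
    by_cases h4 : s + 4 ≤ st.length
    · rw [List.take_append, List.take_of_length_le (by omega)]
      have hz : List.take (4 - v.length) (st.drop (s + 4)) = [] := by
        have : 4 - v.length = 0 := by omega
        simp [this]
      simp [hz]
    · have hS : st.drop (s + 4) = [] := List.drop_eq_nil_of_le (by omega)
      rw [hS, List.append_nil, List.take_of_length_le (by omega)]
  · have hv0 : v = [] := List.eq_nil_of_length_eq_zero (by omega)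
    have hS : st.drop (s + 4) = [] := List.drop_eq_nil_of_le (by omega)
    simp [hv0, hS, List.drop_eq_nil_of_le, Nat.le_of_not_le h]
lemma drop_set (st : List Int) (s : Nat) (v : List Int)
    (hv : v.length = ((st.drop s).take 4).length) :
    (st.take s ++ v ++ st.drop (s + 4)).drop (s + 4) = st.drop (s + 4) := by
  simp only [List.length_take, List.length_drop] at hv
  by_cases h4 : s + 4 ≤ st.length
  · rw [List.drop_left' (by simp; omega)]
  · have hS : st.drop (s + 4) = [] := List.drop_eq_nil_of_le (by omega)
    rw [hS, List.append_nil, List.drop_eq_nil_of_le (by simp; omega)]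

-- a constant-argument foldl is function iteration
lemma foldl_const_iterate (l : List Int) (f : List Int → List Int) (st : List Int) :
    l.foldl (fun a _ => f a) st = f^[l.length] st := by
  induction l generalizing st with
  | nil => rfl
  | cons x l ih => simp [List.foldl_cons, ih, Function.iterate_succ_apply]

-- iterating the step keeps the prefix/suffix and iterates rotStep on the window
lemma iterate_set (st : List Int) (s j : Nat) (N : Nat) :
    (fun t => t.take s ++ rotStep j ((t.drop s).take 4) ++ t.drop (s + 4))^[N] st =
    st.take s ++ (rotStep j)^[N] ((st.drop s).take 4) ++ st.drop (s + 4) := by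
  induction N generalizing st with
  | zero => simp only [Function.iterate_zero, id_eq]; exact (split_window st s).symm
  | succ N ih =>
      rw [Function.iterate_succ_apply, ih]
      have hv : (rotStep j ((st.drop s).take 4)).length = ((st.drop s).take 4).length :=
        rotStep_length _ _
      rw [take_set st s _ hv, window_set st s _ hv, drop_set st s _ hv,
          ← Function.iterate_succ_apply]

-- iterated rotStep is List.rotate when the shift is at most the length
lemma rotStep_iter_rotate (j : Nat) (v : List Int) (hj : j ≤ v.length) (N : Nat) :
    (rotStep j)^[N] v = v.rotate (j * N) := by
  induction N generalizing v with
  | zero => simp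
  | succ N ih =>
      rw [Function.iterate_succ_apply]
      have h1 : rotStep j v = v.rotate j := (List.rotate_eq_drop_append_take hj).symm
      rw [h1, ih (v.rotate j) (by simpa using hj), List.rotate_rotate]
      congr 1; ring

-- the inverse step is the identity on windows shorter than 4
lemma rotStep_three_id (v : List Int) (hv : v.length ≤ 3) : rotStep 3 v = v := by
  unfold rotStep
  rw [List.drop_eq_nil_of_le hv, List.take_of_length_le hv, List.nil_append]

lemma rotStep_iter_id (j : Nat) (v : List Int) (h : rotStep j v = v) (N : Nat) :
    (rotStep j)^[N] v = v := Function.iterate_fixed h N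

-- rotating a constant list is the identity
lemma rotStep_const (j : Nat) (v : List Int) (hj : j ≤ v.length)
    (hc : ∀ x ∈ v, x = v.headI) : rotStep j v = v := by
  have hv : v = List.replicate v.length v.headI := by
    apply List.eq_replicate_of_mem
    intro x hx; exact hc x hx
  rw [rotStep, hv, List.drop_replicate, List.take_replicate]
  rw [← List.replicate_add]
  congr 1
  omega

-- a nonconstant short list moved by a proper rotation changes
lemma rotStep_ne (v : List Int) (j : Nat) (hj0 : 0 < j) (hjm : j < v.length)
    (hm : v.length ≤ 3) (hnc : ¬ ∀ x ∈ v, x = v.headI) : rotStep j v ≠ v := by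
  intro h
  apply hnc
  rcases v with _ | ⟨a, v⟩
  · simp at hjm
  rcases v with _ | ⟨b, v⟩
  · simp at hjm; omega
  rcases v with _ | ⟨c, v⟩
  · have hj1 : j = 1 := by simp at hjm; omega
    subst hj1
    simp [rotStep] at h
    obtain ⟨h1, h2⟩ := h
    intro x hx
    simp only [List.mem_cons, List.not_mem_nil, or_false] at hx
    simp only [List.headI]
    rcases hx with rfl | rfl <;> omega
  rcases v with _ | ⟨d, v⟩
  · have hj12 : j = 1 ∨ j = 2 := by simp at hjm; omega
    rcases hj12 with rfl | rfl
    · simp [rotStep] at h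
      obtain ⟨h1, h2, h3⟩ := h
      intro x hx
      simp only [List.mem_cons, List.not_mem_nil, or_false] at hx
      simp only [List.headI]
      rcases hx with rfl | rfl | rfl <;> omega
    · simp [rotStep] at h
      obtain ⟨h1, h2, h3⟩ := h
      intro x hx
      simp only [List.mem_cons, List.not_mem_nil, or_false] at hx
      simp only [List.headI]
      rcases hx with rfl | rfl | rfl <;> omega
  · exfalso
    simp only [List.length_cons] at hm
    omega

-- evaluation lemma for the port of A at a nonnegative pointer
lemma A_eval (state : List Int) (s : Nat) (nbr : Int) (inv : Bool) :
    shift_row state (s : Int) nbr inv =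
      state.take s ++ (rotStep (if inv then 3 else 1))^[nbr.toNat] ((state.drop s).take 4) ++
        state.drop (s + 4) := by
  have hNlen : (PySem.List.pyRange 0 nbr 1).length = nbr.toNat := by
    rw [PySem.List.length_pyRange_one]; simp
  have hA1 : ∀ j : Nat, j ≤ 4 → ∀ t : List Int,
      pySetSlice t (s : Int) ((s : Int) + 4)
        (PySem.List.slice t (some ((s : Int) + (j : Int))) (some ((s : Int) + 4)) ++
         PySem.List.slice t (some (s : Int)) (some ((s : Int) + (j : Int)))) =
      t.take s ++ rotStep j ((t.drop s).take 4) ++ t.drop (s + 4) := by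
    intro j hj t
    rw [slice_window t s j hj, pySetSlice_nonneg]
  cases inv with
  | false =>
      simp only [shift_row, Bool.false_eq_true, if_false]
      have hf := hA1 1 (by omega)
      push_cast at hf
      simp only [hf]
      rw [foldl_const_iterate (PySem.List.pyRange 0 nbr 1)
            (fun t => t.take s ++ rotStep 1 ((t.drop s).take 4) ++ t.drop (s + 4)) state,
          hNlen, iterate_set]
  | true =>
      simp only [shift_row, if_true]
      have hf := hA1 3 (by omega)
      push_cast at hf
      simp only [hf]
      rw [foldl_const_iterate (PySem.List.pyRange 0 nbr 1)
            (fun t => t.take s ++ rotStep 3 ((t.drop s).take 4) ++ t.drop (s + 4)) state,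
          hNlen, iterate_set]

-- evaluation lemma for the port of B at a nonnegative pointer, nonempty window, positive nbr
lemma B_eval (state : List Int) (s : Nat) (nbr : Int) (inv : Bool)
    (hw : (state.drop s).take 4 ≠ []) (hn : 0 < nbr) :
    shift_row_alt state (s : Int) nbr inv =
      state.take s ++
        rotStep (PySem.Int.mod (if inv then -nbr else nbr)
            (((state.drop s).take 4).length : Int)).toNat ((state.drop s).take 4) ++
        state.drop (s + 4) := by
  have hwin : PySem.List.slice state (some ((s : Int))) (some ((s : Int) + 4)) =
      (state.drop s).take 4 := by
    have h2 : ((s:Int) + 4) = ((s + 4 : Nat) : Int) := by push_cast; ring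
    rw [h2, PySem.List.slice_natCast]; congr 1; omega
  set w := (state.drop s).take 4 with hwdef
  have hb : (0:Int) < (w.length : Int) := by
    have : 0 < w.length := List.length_pos_of_ne_nil hw
    exact_mod_cast this
  set k := PySem.Int.mod (if inv then -nbr else nbr) (w.length : Int) with hk
  have hknn : 0 ≤ k := PySem.Int.mod_nonneg _ hb
  unfold shift_row_alt
  simp only [hwin]
  rw [if_pos ⟨hw, hn⟩]
  rw [← hk, PySem.List.slice_from w hknn, PySem.List.slice_to w hknn, pySetSlice_nonneg]
  rfl

-- a chain of equalities means every element equals the head, and conversely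
lemma chain_const (l : List Int) (h : l.IsChain (· = ·)) : ∀ x ∈ l, x = l.headI := by
  rcases l with _ | ⟨a, t⟩
  · simp
  · have hrep := List.isChain_cons_eq_iff_eq_replicate.mp h
    intro x hx
    simp only [List.headI]
    rcases List.mem_cons.mp hx with rfl | hxt
    · rfl
    · rw [hrep] at hxt
      exact List.eq_of_mem_replicate hxt
lemma const_chain (l : List Int) (h : ∀ x ∈ l, x = l.headI) : l.IsChain (· = ·) := by
  have hrep : l = List.replicate l.length l.headI := List.eq_replicate_of_mem h
  rw [hrep]
  exact List.isChain_replicate_of_rel _ rfl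

-- both evaluated forms share prefix and suffix; the results differ iff the windows do
lemma middle_ne (P S v r : List Int) (h : v ≠ r) :
    P ++ v ++ S ≠ P ++ r ++ S := by
  intro he
  apply h
  rw [List.append_assoc, List.append_assoc] at he
  have h1 := List.append_cancel_left he
  exact List.append_cancel_right h1

-- ===== VERDICT (by name: the statement is the Claim_ definition above) =====
theorem shift_row_spec : Claim_unchanged_shift_row := by
  unfold Claim_unchanged_shift_row Spec_shift_row Pre_shift_row
  intro state sp nbr inv _ hsp hD
  obtain ⟨s, rfl⟩ : ∃ s : Nat, sp = (s : Int) := ⟨sp.toNat, (Int.toNat_of_nonneg hsp).symm⟩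
  have hwin : PySem.List.slice state (some ((s : Int))) (some ((s : Int) + 4)) =
      (state.drop s).take 4 := by
    have h2 : ((s:Int) + 4) = ((s + 4 : Nat) : Int) := by push_cast; ring
    rw [h2, PySem.List.slice_natCast]; congr 1; omega
  set w := (state.drop s).take 4 with hwdef
  by_cases hn : 0 < nbr
  · by_cases hw : w = []
    · -- empty window: A iterates over it trivially, B skips the assignment
      have hB : shift_row_alt state ((s : Nat) : Int) nbr inv = state := by
        unfold shift_row_alt
        simp only [hwin]
        rw [if_neg (by simp [hw])]
      have hsw := split_window state s
      rw [← hwdef, hw] at hsw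
      rw [A_eval, ← hwdef, hw, rotStep_iter_id _ _ (by cases inv <;> rfl), hB]
      exact hsw
    · rw [A_eval, B_eval state s nbr inv hw hn, ← hwdef]
      congr 2
      have hml : 0 < w.length := List.length_pos_of_ne_nil hw
      have hm4 : w.length ≤ 4 := by rw [hwdef]; simp
      have hb : (0:Int) < (w.length : Int) := by exact_mod_cast hml
      obtain ⟨N, rfl⟩ : ∃ N : Nat, nbr = (N : Int) :=
        ⟨nbr.toNat, (Int.toNat_of_nonneg (by omega)).symm⟩
      cases inv with
      | false =>
          simp only [Bool.false_eq_true, if_false, Int.toNat_natCast]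
          rw [rotStep_iter_rotate 1 w (by omega), one_mul,
              PySem.Int.mod_natCast, Int.toNat_natCast]
          show w.rotate N = w.drop (N % w.length) ++ w.take (N % w.length)
          rw [← List.rotate_eq_drop_append_take (Nat.le_of_lt (Nat.mod_lt _ hml)),
              List.rotate_mod]
      | true =>
          simp only [if_true, Int.toNat_natCast]
          have hknn : 0 ≤ PySem.Int.mod (-(N:Int)) (w.length : Int) :=
            PySem.Int.mod_nonneg _ hb
          have hklt := PySem.Int.mod_lt (-(N:Int)) hb
          have hKe := PySem.Int.mod_eq_emod_of_pos (a := -(N:Int)) hb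
          by_cases h4 : w.length = 4
          · -- full window: net left rotation 3N = right rotation N mod 4
            rw [rotStep_iter_rotate 3 w (by omega)]
            show w.rotate (3 * N) =
              w.drop (PySem.Int.mod (-(N:Int)) (w.length : Int)).toNat ++
                w.take (PySem.Int.mod (-(N:Int)) (w.length : Int)).toNat
            rw [← List.rotate_eq_drop_append_take (by omega)]
            have hmodeq : (3 * N) % w.length =
                (PySem.Int.mod (-(N:Int)) (w.length : Int)).toNat % w.length := by
              have h4' : ((w.length : Nat) : Int) = 4 := by rw [h4]; norm_num
              rw [h4'] at hKe hknn
              rw [h4]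
              push_cast
              omega
            calc w.rotate (3 * N)
                = w.rotate ((3 * N) % w.length) := (List.rotate_mod _ _).symm
              _ = w.rotate ((PySem.Int.mod (-(N:Int)) (w.length : Int)).toNat % w.length) := by
                  rw [hmodeq]
              _ = w.rotate ((PySem.Int.mod (-(N:Int)) (w.length : Int)).toNat) :=
                  List.rotate_mod _ _
          · -- truncated window: A's step is the identity; ¬D_ forces divisibility or a constant row
            have hle3 : w.length ≤ 3 := by omega
            rw [rotStep_iter_id 3 w (rotStep_three_id w hle3)]
            have hsle : s ≤ state.length := by
              by_contra hc
              exact hw (by rw [hwdef, List.drop_eq_nil_of_le (by omega)]; rfl)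
            have hwlen : w.length = min 4 (state.length - s) := by rw [hwdef]; simp
            have hlen : state.length = s + w.length := by omega
            have hwl : ((state.length : Int) - s) = (w.length : Int) := by
              rw [hlen]; push_cast; ring
            by_cases hdvd : ((w.length : Int) ∣ (N : Int))
            · have hk0 : PySem.Int.mod (-(N:Int)) (w.length : Int) = 0 := by
                rw [hKe]
                exact Int.emod_eq_zero_of_dvd (Dvd.dvd.neg_right hdvd)
              rw [hk0]
              simp [rotStep]
            · by_cases hconst : ∀ x ∈ w, x = w.headI
              · exact (rotStep_const _ w (by omega) hconst).symm
              · exfalso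
                apply hD
                refine ⟨rfl, hn, by positivity, ?_, ?_, ?_, ?_⟩
                · exact_mod_cast (show s < state.length by omega)
                · have : state.length < s + 4 := by omega
                  exact_mod_cast (show (state.length : Int) < (s : Int) + 4 by omega)
                · rw [hwl]
                  intro h0
                  exact hdvd (Int.dvd_of_emod_eq_zero h0)
                · simp only [Int.toNat_natCast]
                  intro hchain
                  apply hconst
                  have hwt : w = state.drop s := by
                    rw [hwdef]; exact List.take_of_length_le (by simp; omega)
                  rw [hwt]
                  exact chain_const _ hchain
  · -- nbr ≤ 0: A's loop is empty and B skips the assignment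
    have hN0 : nbr.toNat = 0 := Int.toNat_of_nonpos (by omega)
    rw [A_eval, hN0]
    simp only [Function.iterate_zero, id_eq]
    rw [← hwdef, split_window]
    unfold shift_row_alt
    rw [if_neg (by intro hcon; exact hn hcon.2)]

theorem shift_row_changed : Claim_changed_shift_row := by
  unfold Claim_changed_shift_row; decide

theorem shift_row_tight : Claim_exact_shift_row := by
  unfold Claim_exact_shift_row
  intro state sp nbr inv _ hsp hD
  obtain ⟨hinv, hn, _, hlt, hlt4, hndvd, hnc⟩ := hD
  obtain ⟨s, rfl⟩ : ∃ s : Nat, sp = (s : Int) := ⟨sp.toNat, (Int.toNat_of_nonneg hsp).symm⟩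
  subst hinv
  set w := (state.drop s).take 4 with hwdef
  have hslen : s < state.length := by exact_mod_cast hlt
  have hwlen : w.length = min 4 (state.length - s) := by rw [hwdef]; simp
  have hslt4 : state.length < s + 4 := by
    have : (state.length : Int) < (s : Int) + 4 := hlt4
    exact_mod_cast this
  have hml : 0 < w.length := by omega
  have hle3 : w.length ≤ 3 := by omega
  have hlen : state.length = s + w.length := by omega
  have hw : w ≠ [] := by
    intro hh; rw [hh] at hml; simp at hml
  have hb : (0:Int) < (w.length : Int) := by exact_mod_cast hml
  have hwl : ((state.length : Int) - s) = (w.length : Int) := by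
    rw [hlen]; push_cast; ring
  rw [A_eval, B_eval state s nbr true hw hn, ← hwdef]
  simp only [if_true]
  rw [rotStep_iter_id 3 w (rotStep_three_id w hle3)]
  set k := PySem.Int.mod (-nbr) (w.length : Int) with hk
  have hknn : 0 ≤ k := PySem.Int.mod_nonneg _ hb
  have hklt : k < (w.length : Int) := PySem.Int.mod_lt _ hb
  rw [hwl] at hndvd
  have hk0 : k ≠ 0 := by
    intro h0
    apply hndvd
    have hKe := PySem.Int.mod_eq_emod_of_pos (a := -nbr) hb
    rw [← hk, h0] at hKe
    have hdv : (w.length : Int) ∣ -nbr := Int.dvd_of_emod_eq_zero hKe.symm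
    exact Int.emod_eq_zero_of_dvd (Int.dvd_neg.mp hdv)
  have hrne : rotStep k.toNat w ≠ w := by
    apply rotStep_ne w k.toNat (by omega) (by omega) hle3
    intro hall
    apply hnc
    simp only [Int.toNat_natCast]
    have hwt : w = state.drop s := by
      rw [hwdef]; exact List.take_of_length_le (by simp; omega)
    rw [← hwt]
    exact const_chain w hall
  exact Ne.symm (middle_ne (state.take s) (state.drop (s + 4)) (rotStep k.toNat w) w hrne)
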